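-- pv_equiv track=rewrite | github.com/Justant-source/Toeic-Brain | scripts/analyze/validate_vault.py | count_ets_examples
-- ===== SOURCE A (Python) =====
-- def count_ets_examples(md_text: str) -> int:
--     """Count ETS example blockquote patterns in the MD file.
--
--     Matches lines starting with '>' which represent ETS example sentences.
--     Groups consecutive blockquote lines as a single example.
--     """
--     count = 0
--     in_block = False
--     for line in md_text.splitlines():
--         stripped = line.strip()
--         if stripped.startswith(">"):
--             if not in_block:
--                 count += 1
--                 in_block = True
--         else:
--             if stripped == "":
--                 in_block = False
--             else:
--                 in_block = False
--     return count
-- ===== SOURCE B (Python) =====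
-- def count_ets_examples(md_text: str) -> int:
--     # Inclusion-exclusion: each maximal run of k consecutive blockquote lines
--     # contributes k quote lines and k-1 adjacent quote pairs, so
--     # (#quote lines) - (#adjacent quote pairs) = number of runs.
--     flags = [line.strip().startswith(">") for line in md_text.splitlines()]
--     return sum(flags) - sum(1 for a, b in zip(flags, flags[1:]) if a and b)
-- ===== Notes on version B (the rewrite author's own statement) =====
-- stated objective: alternative
-- what changed: Replaces A's sequential state machine (in_block flag) by an arithmetic inclusion-exclusion identity: number of maximal quote runs = number of quote lines minus number of adjacent quote-line pairs, computed in staged passes (flag list, then two sums) with no carried state.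
import Mathlib
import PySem

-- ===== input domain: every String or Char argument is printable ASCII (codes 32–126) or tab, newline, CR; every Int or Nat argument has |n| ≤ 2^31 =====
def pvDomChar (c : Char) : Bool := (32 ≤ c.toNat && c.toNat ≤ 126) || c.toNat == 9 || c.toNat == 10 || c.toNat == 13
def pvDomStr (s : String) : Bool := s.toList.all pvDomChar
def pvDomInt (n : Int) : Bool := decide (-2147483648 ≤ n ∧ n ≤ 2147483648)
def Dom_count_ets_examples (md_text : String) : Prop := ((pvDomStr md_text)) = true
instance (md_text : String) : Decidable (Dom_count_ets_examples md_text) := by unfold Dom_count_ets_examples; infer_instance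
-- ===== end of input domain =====

-- B replaces A's sequential in_block state machine by an inclusion-exclusion
-- identity: runs = quote lines minus adjacent quote-line pairs (alternative).

-- ===== PORT A =====
-- fold state: (count, in_block)
def count_ets_examples (md_text : String) : Int :=
  ((PySem.Str.splitlines md_text).foldl
    (fun (s : Int × Bool) line =>
      let stripped := PySem.Str.strip line
      if PySem.Str.startswith stripped ">" then
        if !s.2 then (s.1 + 1, true) else s
      else
        if stripped == "" then (s.1, false) else (s.1, false))
    (0, false)).1

-- ===== PORT B =====
-- sum(flags): number of true flags
def pvCountTrue : List Bool → Int
  | [] => 0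
  | b :: rest => (if b then 1 else 0) + pvCountTrue rest

-- sum(1 for a, b in zip(flags, flags[1:]) if a and b): adjacent true pairs
def pvAdjBoth : List Bool → Int
  | a :: b :: rest => (if a && b then 1 else 0) + pvAdjBoth (b :: rest)
  | _ => 0

def count_ets_examples_alt (md_text : String) : Int :=
  let flags := (PySem.Str.splitlines md_text).map
    (fun line => PySem.Str.startswith (PySem.Str.strip line) ">")
  pvCountTrue flags - pvAdjBoth flags

-- ===== PRECONDITION & SPEC =====
def Spec_count_ets_examples (md_text : String) (out : Int) : Prop := out = count_ets_examples_alt md_text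
instance (md_text : String) (out : Int) : Decidable (Spec_count_ets_examples md_text out) := by unfold Spec_count_ets_examples; infer_instance

-- ===== CLAIM (what is proved, stated in full; the proofs are below) =====
def Claim_equal_count_ets_examples : Prop := ∀ (md_text : String), Dom_count_ets_examples md_text → Spec_count_ets_examples md_text (count_ets_examples md_text)

-- ===== LEMMAS AND PROOFS =====
def pvStepA (p q : String → Bool) (s : Int × Bool) (line : String) : Int × Bool :=
  if p line then (if !s.2 then (s.1 + 1, true) else s)
  else (if q line then (s.1, false) else (s.1, false))

theorem pv_fold_eq_incl_excl (p q : String → Bool) (lines : List String) (c : Int) (prev : Bool) :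
    ((lines.foldl (pvStepA p q) (c, prev)).1)
      = c + pvCountTrue (lines.map p) - pvAdjBoth (prev :: lines.map p) := by
  induction lines generalizing c prev with
  | nil => simp [pvCountTrue, pvAdjBoth]
  | cons hd tl ih =>
    rw [List.foldl_cons, List.map_cons]
    by_cases h : p hd = true
    · cases prev with
      | false =>
        have hs : pvStepA p q (c, false) hd = (c + 1, true) := by simp [pvStepA, h]
        rw [hs, ih]; simp [pvCountTrue, pvAdjBoth, h]; ring
      | true =>
        have hs : pvStepA p q (c, true) hd = (c, true) := by simp [pvStepA, h]
        rw [hs, ih]; simp [pvCountTrue, pvAdjBoth, h]; ring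
    · have hs : pvStepA p q (c, prev) hd = (c, false) := by simp [pvStepA, h]
      rw [hs, ih]; simp [pvCountTrue, pvAdjBoth, h]

theorem pvAdjBoth_false_cons (l : List Bool) : pvAdjBoth (false :: l) = pvAdjBoth l := by
  cases l <;> simp [pvAdjBoth]

-- ===== VERDICT (by name: the statement is the Claim_ definition above) =====
theorem count_ets_examples_spec : Claim_equal_count_ets_examples := by
  intro md _
  unfold Spec_count_ets_examples count_ets_examples count_ets_examples_alt
  have h := pv_fold_eq_incl_excl (fun line => PySem.Str.startswith (PySem.Str.strip line) ">")
      (fun line => PySem.Str.strip line == "") (PySem.Str.splitlines md) 0 false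
  rw [pvAdjBoth_false_cons, zero_add] at h
  exact h
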